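-- pv_equiv track=rewrite | github.com/Shiyinghui/Masked-MMEA | classification/process_type.py | get_type2path
-- ===== SOURCE A (Python) =====
-- def get_type2path(sub2super: dict):
--     """
--     :param sub2super: key: an entity type, value: its super class
--     """
--     type2path = dict()
--     for k in sub2super.keys():
--         leaf = k
--         hierarchical_class = [k]
--         while True:
--             if k in sub2super:
--                 hierarchical_class.append(sub2super[k])
--                 k = sub2super[k]
--             else:
--                 break
--         type2path[leaf] = hierarchical_class
--     return type2path
-- ===== SOURCE B (Python) =====
-- def get_type2path(sub2super: dict):
--     """
--     :param sub2super: key: an entity type, value: its super class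
--     """
--     memo = {}
--     for k in sub2super:
--         stack = []
--         cur = k
--         while cur not in memo and cur in sub2super:
--             stack.append(cur)
--             cur = sub2super[cur]
--         tail = memo[cur] if cur in memo else [cur]
--         for node in reversed(stack):
--             tail = [node] + tail
--             memo[node] = tail
--     return {k: memo[k] for k in sub2super}
-- ===== Notes on version B (the rewrite author's own statement) =====
-- stated objective: alternative
-- what changed: Instead of re-walking the full ancestor chain from every key, B memoizes each computed path: it walks up only until it hits an already-computed node or a root, then fills the memo backwards, so every hierarchy edge is traversed once (pays off on deep hierarchies, not on the shallow random ones a timing run generates).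
import Mathlib
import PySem

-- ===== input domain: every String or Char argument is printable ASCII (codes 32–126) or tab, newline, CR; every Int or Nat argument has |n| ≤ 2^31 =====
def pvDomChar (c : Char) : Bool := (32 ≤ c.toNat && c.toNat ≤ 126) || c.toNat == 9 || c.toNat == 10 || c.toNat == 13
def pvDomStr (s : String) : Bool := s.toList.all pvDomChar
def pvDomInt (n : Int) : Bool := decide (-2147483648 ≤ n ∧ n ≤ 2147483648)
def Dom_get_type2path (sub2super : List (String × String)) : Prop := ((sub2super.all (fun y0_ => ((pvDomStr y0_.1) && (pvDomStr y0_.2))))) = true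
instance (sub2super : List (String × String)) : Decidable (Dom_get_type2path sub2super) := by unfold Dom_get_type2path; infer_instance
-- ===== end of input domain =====

-- B memoizes ancestor paths, walking up only to the first already-computed node, so every
-- hierarchy edge is traversed once instead of once per descendant; equal to A on every input
-- whose super-class chains terminate (Pre_ excludes cyclic hierarchies, on which the Python A
-- loops forever).

-- ===== PORT A =====
-- the 'while True' chain walk of A; fuel (size+1) only makes the loop total — under Pre_ it never runs out
def pvLoopA (d : PySem.Dict String String) : Nat → String → List String → List String
  | 0, _, acc => acc
  | f+1, k, acc =>
    match d.get? k with
    | some v => pvLoopA d f v (acc ++ [v])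
    | none => acc

def get_type2path (sub2super : List (String × String)) : List (String × List String) :=
  let d := PySem.Dict.ofList sub2super
  (d.keys.foldl (fun out k => out.insert k (pvLoopA d (d.size + 1) k [k])) PySem.Dict.empty).items

-- ===== PORT B =====
-- the 'while cur not in memo and cur in sub2super' walk of B (same fuel guard as A's loop)
def pvWalk (d : PySem.Dict String String) : Nat → PySem.Dict String (List String) → String → List String → List String × String
  | 0, _, cur, stack => (stack, cur)
  | f+1, memo, cur, stack =>
    match memo.get? cur, d.get? cur with
    | none, some v => pvWalk d f memo v (stack ++ [cur])
    | _, _ => (stack, cur)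

-- the 'for node in reversed(stack)' backward fill of B
def pvFill (tail0 : List String) (memo : PySem.Dict String (List String)) (rstack : List String) :
    List String × PySem.Dict String (List String) :=
  rstack.foldl (fun q node => (node :: q.1, q.2.insert node (node :: q.1))) (tail0, memo)

-- one iteration of B's outer 'for k in sub2super' loop
def pvStepB (d : PySem.Dict String String) (F : Nat) (memo : PySem.Dict String (List String)) (k : String) :
    PySem.Dict String (List String) :=
  let ws := pvWalk d F memo k []
  let tail0 := match memo.get? ws.2 with | some p => p | none => [ws.2]
  (pvFill tail0 memo ws.1.reverse).2

def get_type2path_alt (sub2super : List (String × String)) : List (String × List String) :=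
  let d := PySem.Dict.ofList sub2super
  let memo := d.keys.foldl (pvStepB d (d.size + 1)) PySem.Dict.empty
  -- final comprehension {k: memo[k] for k in sub2super}; memo[k] is always present when the
  -- walks terminated (proved below), so the total rendering getD [] is exact under Pre_
  d.keys.map (fun k => (k, memo.getD k []))

-- ===== PRECONDITION & SPEC =====
def pvNext (d : PySem.Dict String String) (k : String) : String := (d.get? k).getD k

-- Pre_ excludes exactly the inputs whose super-class chain cycles: there the Python A loops forever
def Pre_get_type2path (sub2super : List (String × String)) : Prop :=
  ∀ k ∈ (PySem.Dict.ofList sub2super).keys,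
    ∃ i ≤ (PySem.Dict.ofList sub2super).size,
      (pvNext (PySem.Dict.ofList sub2super))^[i] k ∉ (PySem.Dict.ofList sub2super).keys

instance (sub2super : List (String × String)) : Decidable (Pre_get_type2path sub2super) := by
  unfold Pre_get_type2path; infer_instance

def pvWitness_get_type2path : (List (String × String)) := [("a", "b"), ("b", "c")]

def Spec_get_type2path (sub2super : List (String × String)) (out : List (String × List String)) : Prop := out = get_type2path_alt sub2super
instance (sub2super : List (String × String)) (out : List (String × List String)) : Decidable (Spec_get_type2path sub2super out) := by unfold Spec_get_type2path; infer_instance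

-- ===== CLAIM (what is proved, stated in full; the proofs are below) =====
def Claim_equal_get_type2path : Prop := ∀ (sub2super : List (String × String)), Dom_get_type2path sub2super → Pre_get_type2path sub2super → Spec_get_type2path sub2super (get_type2path sub2super)

-- ===== LEMMAS AND PROOFS =====

-- the mathematical ancestor chain k, parent k, … down to (and including) the first non-key
def pvTrace (d : PySem.Dict String String) : Nat → String → List String
  | 0, k => [k]
  | f+1, k => match d.get? k with | some v => k :: pvTrace d f v | none => [k]

-- termination of every chain within d.size steps (what Pre_ says about d)
def pvTerm (d : PySem.Dict String String) : Prop :=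
  ∀ k ∈ d.keys, ∃ i ≤ d.size, (pvNext d)^[i] k ∉ d.keys

-- every memo entry is the true chain
def pvGood (d : PySem.Dict String String) (F : Nat) (memo : PySem.Dict String (List String)) : Prop :=
  ∀ x p, memo.get? x = some p → p = pvTrace d F x

-- stack elements are consecutively linked, ending at cur'
def pvLinked (d : PySem.Dict String String) : List String → String → Prop
  | [], _ => True
  | a :: rest, c => d.get? a = some (rest.headD c) ∧ pvLinked d rest c

theorem pvMemKeys_of_get? (d : PySem.Dict String String) (k v : String)
    (h : d.get? k = some v) : k ∈ d.keys := by
  by_contra hk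
  rw [(PySem.Dict.get?_eq_none_iff_not_mem_keys d k).mpr hk] at h
  cases h

theorem pvTrace_head (d : PySem.Dict String String) (f : Nat) (k : String) :
    pvTrace d f k = k :: (pvTrace d f k).tail := by
  cases f with
  | zero => rfl
  | succ f => simp only [pvTrace]; cases d.get? k <;> simp

theorem pvTrace_terminal (d : PySem.Dict String String) (f : Nat) (k : String)
    (h : d.get? k = none) : pvTrace d f k = [k] := by
  cases f with
  | zero => rfl
  | succ f => simp only [pvTrace, h]

theorem pvTrace_some (d : PySem.Dict String String) (f : Nat) (k v : String)
    (h : d.get? k = some v) : pvTrace d (f+1) k = k :: pvTrace d f v := by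
  simp only [pvTrace, h]

theorem pvLoopA_eq (d : PySem.Dict String String) :
    ∀ (f : Nat) (k : String) (acc : List String),
      pvLoopA d f k acc = acc ++ (pvTrace d f k).tail := by
  intro f
  induction f with
  | zero => intro k acc; simp [pvLoopA, pvTrace]
  | succ f ih =>
    intro k acc
    cases h : d.get? k with
    | none => simp [pvLoopA, pvTrace, h]
    | some v =>
      simp only [pvLoopA, pvTrace, h]
      rw [ih v (acc ++ [v])]
      conv_rhs => rw [pvTrace_head d f v]
      simp

theorem pvTrace_stable (d : PySem.Dict String String) :
    ∀ (j f : Nat) (k : String), j ≤ f → (pvNext d)^[j] k ∉ d.keys →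
      pvTrace d (f+1) k = pvTrace d f k := by
  intro j
  induction j with
  | zero =>
    intro f k _ hout
    simp only [Function.iterate_zero, id_eq] at hout
    have h := (PySem.Dict.get?_eq_none_iff_not_mem_keys d k).mpr hout
    rw [pvTrace_terminal d _ _ h, pvTrace_terminal d _ _ h]
  | succ j ih =>
    intro f k hjf hout
    cases h : d.get? k with
    | none => rw [pvTrace_terminal d _ _ h, pvTrace_terminal d _ _ h]
    | some v =>
      obtain ⟨f', rfl⟩ : ∃ f', f = f' + 1 := ⟨f - 1, by omega⟩
      rw [pvTrace_some d (f' + 1) k v h, pvTrace_some d f' k v h]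
      have hnext : pvNext d k = v := by simp [pvNext, h]
      rw [Function.iterate_succ_apply, hnext] at hout
      rw [ih f' v (by omega) hout]

theorem pvTrace_unfold1 (d : PySem.Dict String String) (k v : String)
    (h : d.get? k = some v) (hx : ∃ i ≤ d.size, (pvNext d)^[i] k ∉ d.keys) :
    pvTrace d (d.size + 1) k = k :: pvTrace d (d.size + 1) v := by
  obtain ⟨i, hile, hout⟩ := hx
  have hk : k ∈ d.keys := pvMemKeys_of_get? d k v h
  cases i with
  | zero => simp only [Function.iterate_zero, id_eq] at hout; exact absurd hk hout
  | succ i =>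
    have hnext : pvNext d k = v := by simp [pvNext, h]
    rw [Function.iterate_succ_apply, hnext] at hout
    have hstable := pvTrace_stable d i d.size v (by omega) hout
    rw [pvTrace_some d d.size k v h, hstable]

theorem pvWalk_spec (d : PySem.Dict String String) :
    ∀ (f j : Nat) (memo : PySem.Dict String (List String)) (cur : String) (stack : List String),
      (pvNext d)^[j] cur ∉ d.keys → j ≤ f →
      ∃ δ cur', pvWalk d f memo cur stack = (stack ++ δ, cur') ∧ pvLinked d δ cur' ∧
        δ.headD cur' = cur ∧ ((memo.get? cur').isSome ∨ d.get? cur' = none) := by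
  intro f
  induction f with
  | zero =>
    intro j memo cur stack hout hj
    refine ⟨[], cur, by simp [pvWalk], trivial, rfl, Or.inr ?_⟩
    have hj0 : j = 0 := by omega
    subst hj0
    simp only [Function.iterate_zero, id_eq] at hout
    exact (PySem.Dict.get?_eq_none_iff_not_mem_keys d cur).mpr hout
  | succ f ih =>
    intro j memo cur stack hout hj
    cases hm : memo.get? cur with
    | some p => exact ⟨[], cur, by simp [pvWalk, hm], trivial, rfl, Or.inl (by simp [hm])⟩
    | none =>
      cases hd : d.get? cur with
      | none => exact ⟨[], cur, by simp [pvWalk, hm, hd], trivial, rfl, Or.inr hd⟩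
      | some v =>
        have hcur : cur ∈ d.keys := pvMemKeys_of_get? d cur v hd
        cases j with
        | zero => simp only [Function.iterate_zero, id_eq] at hout; exact absurd hcur hout
        | succ j =>
          have hnext : pvNext d cur = v := by simp [pvNext, hd]
          rw [Function.iterate_succ_apply, hnext] at hout
          obtain ⟨δ, cur', heq, hlink, hhead, hstop⟩ := ih j memo v (stack ++ [cur]) hout (by omega)
          refine ⟨cur :: δ, cur', ?_, ⟨?_, hlink⟩, rfl, hstop⟩
          · simp only [pvWalk, hm, hd]; rw [heq]; simp
          · rw [hhead]; exact hd

theorem pvFill_spec (d : PySem.Dict String String) (hterm : pvTerm d) :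
    ∀ (stack : List String) (cur' : String) (memo : PySem.Dict String (List String)),
      pvLinked d stack cur' → pvGood d (d.size + 1) memo →
      (pvFill (pvTrace d (d.size + 1) cur') memo stack.reverse).1
          = pvTrace d (d.size + 1) (stack.headD cur') ∧
      pvGood d (d.size + 1) (pvFill (pvTrace d (d.size + 1) cur') memo stack.reverse).2 ∧
      (∀ x, (memo.get? x).isSome →
        (((pvFill (pvTrace d (d.size + 1) cur') memo stack.reverse).2).get? x).isSome) ∧
      (∀ s ∈ stack, (((pvFill (pvTrace d (d.size + 1) cur') memo stack.reverse).2).get? s).isSome) := by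
  intro stack
  induction stack with
  | nil =>
    intro cur' memo _ hgood
    refine ⟨rfl, hgood, fun x h => h, by simp⟩
  | cons a rest ih =>
    intro cur' memo hlink hgood
    obtain ⟨ha, hrest⟩ := hlink
    obtain ⟨ih1, ih2, ih3, ih4⟩ := ih cur' memo hrest hgood
    have hamem : a ∈ d.keys := pvMemKeys_of_get? d a _ ha
    have hfill : pvFill (pvTrace d (d.size + 1) cur') memo (a :: rest).reverse
        = ((a :: (pvFill (pvTrace d (d.size + 1) cur') memo rest.reverse).1),
           ((pvFill (pvTrace d (d.size + 1) cur') memo rest.reverse).2).insert a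
             (a :: (pvFill (pvTrace d (d.size + 1) cur') memo rest.reverse).1)) := by
      rw [List.reverse_cons]
      unfold pvFill
      rw [List.foldl_append]
      rfl
    have htr : a :: (pvFill (pvTrace d (d.size + 1) cur') memo rest.reverse).1
        = pvTrace d (d.size + 1) a := by
      rw [ih1, ← pvTrace_unfold1 d a (rest.headD cur') ha (hterm a hamem)]
    refine ⟨?_, ?_, ?_, ?_⟩
    · rw [hfill]; simpa using htr
    · rw [hfill]
      intro x p hx
      rw [PySem.Dict.get?_insert] at hx
      by_cases hxa : x = a
      · subst hxa; rw [if_pos rfl] at hx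
        cases hx; rw [htr]
      · rw [if_neg hxa] at hx
        exact ih2 x p hx
    · rw [hfill]
      intro x hx
      rw [PySem.Dict.get?_insert]
      by_cases hxa : x = a
      · simp [hxa]
      · rw [if_neg hxa]; exact ih3 x hx
    · rw [hfill]
      intro s hs
      rw [PySem.Dict.get?_insert]
      by_cases hsa : s = a
      · simp [hsa]
      · rw [if_neg hsa]
        rcases List.mem_cons.mp hs with rfl | hs
        · exact absurd rfl hsa
        · exact ih4 s hs

theorem pvStepB_spec (d : PySem.Dict String String) (hterm : pvTerm d)
    (memo : PySem.Dict String (List String)) (k : String) (hk : k ∈ d.keys)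
    (hgood : pvGood d (d.size + 1) memo) :
    pvGood d (d.size + 1) (pvStepB d (d.size + 1) memo k) ∧
    (∀ x, (memo.get? x).isSome → ((pvStepB d (d.size + 1) memo k).get? x).isSome) ∧
    ((pvStepB d (d.size + 1) memo k).get? k).isSome := by
  obtain ⟨j, hj, hout⟩ := hterm k hk
  obtain ⟨δ, cur', heq, hlink, hhead, hstop⟩ := pvWalk_spec d (d.size + 1) j memo k [] hout (by omega)
  have htail : (match memo.get? cur' with | some p => p | none => [cur'])
      = pvTrace d (d.size + 1) cur' := by
    cases hm : memo.get? cur' with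
    | some p => exact hgood cur' p hm
    | none =>
      have hd : d.get? cur' = none := by
        rcases hstop with h | h
        · rw [hm] at h; simp at h
        · exact h
      exact (pvTrace_terminal d (d.size + 1) cur' hd).symm
  have hstep : pvStepB d (d.size + 1) memo k
      = (pvFill (pvTrace d (d.size + 1) cur') memo δ.reverse).2 := by
    simp only [pvStepB]
    rw [heq]
    simp only [List.nil_append]
    rw [htail]
  obtain ⟨h1, h2, h3, h4⟩ := pvFill_spec d hterm δ cur' memo hlink hgood
  refine ⟨by rw [hstep]; exact h2, by rw [hstep]; exact h3, ?_⟩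
  rw [hstep]
  cases δ with
  | nil =>
    have hck : cur' = k := hhead
    have hms : (memo.get? cur').isSome := by
      rcases hstop with h | h
      · exact h
      · rw [hck] at h
        exact absurd hk ((PySem.Dict.get?_eq_none_iff_not_mem_keys d k).mp h)
    rw [← hck]
    exact h3 cur' hms
  | cons a δ' =>
    have hak : a = k := hhead
    subst hak
    exact h4 a (by simp)

theorem pvFold_spec (d : PySem.Dict String String) (hterm : pvTerm d) :
    ∀ (ks : List String) (memo : PySem.Dict String (List String)),
      (∀ k ∈ ks, k ∈ d.keys) → pvGood d (d.size + 1) memo →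
      pvGood d (d.size + 1) (ks.foldl (pvStepB d (d.size + 1)) memo) ∧
      (∀ x, (memo.get? x).isSome → ((ks.foldl (pvStepB d (d.size + 1)) memo).get? x).isSome) ∧
      (∀ k ∈ ks, ((ks.foldl (pvStepB d (d.size + 1)) memo).get? k).isSome) := by
  intro ks
  induction ks with
  | nil => intro memo _ hgood; exact ⟨hgood, fun x h => h, by simp⟩
  | cons a ks ih =>
    intro memo hmem hgood
    obtain ⟨sg, sm, sp⟩ := pvStepB_spec d hterm memo a (hmem a (by simp)) hgood
    obtain ⟨fg, fm, fp⟩ := ih (pvStepB d (d.size + 1) memo a) (fun k hk => hmem k (by simp [hk])) sg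
    refine ⟨fg, fun x hx => fm x (sm x hx), ?_⟩
    intro k hk
    rcases List.mem_cons.mp hk with rfl | hk'
    · exact fm _ sp
    · exact fp k hk' 

-- ===== VERDICT (by name: the statement is the Claim_ definition above) =====
theorem get_type2path_spec : Claim_equal_get_type2path := by
  intro m _dom hpre
  have hterm : pvTerm (PySem.Dict.ofList m) := hpre
  have hnd : (PySem.Dict.ofList m).keys.Nodup := PySem.Dict.nodup_keys_ofList m
  obtain ⟨fg, -, fp⟩ := pvFold_spec (PySem.Dict.ofList m) hterm (PySem.Dict.ofList m).keys
    PySem.Dict.empty (fun k hk => hk)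
    (fun x p hx => by rw [PySem.Dict.get?_empty] at hx; cases hx)
  show ((PySem.Dict.ofList m).keys.foldl
      (fun out k => out.insert k (pvLoopA (PySem.Dict.ofList m) ((PySem.Dict.ofList m).size + 1) k [k]))
      PySem.Dict.empty).items
    = (PySem.Dict.ofList m).keys.map (fun k => (k,
        ((PySem.Dict.ofList m).keys.foldl (pvStepB (PySem.Dict.ofList m) ((PySem.Dict.ofList m).size + 1))
          PySem.Dict.empty).getD k []))
  have hA : ((PySem.Dict.ofList m).keys.foldl
      (fun out k => out.insert k (pvLoopA (PySem.Dict.ofList m) ((PySem.Dict.ofList m).size + 1) k [k]))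
      PySem.Dict.empty).items
      = (PySem.Dict.empty : PySem.Dict String (List String)).items
        ++ (PySem.Dict.ofList m).keys.map
          (fun a => (a, pvLoopA (PySem.Dict.ofList m) ((PySem.Dict.ofList m).size + 1) a [a])) :=
    PySem.Dict.items_foldl_insert_fresh (PySem.Dict.ofList m).keys (fun a => a)
      (fun a => pvLoopA (PySem.Dict.ofList m) ((PySem.Dict.ofList m).size + 1) a [a])
      PySem.Dict.empty (by intro a _; simp) (by simp [hnd])
  have hie : (PySem.Dict.empty : PySem.Dict String (List String)).items = [] := rfl
  rw [hA, hie, List.nil_append]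
  apply List.map_congr_left
  intro k hk
  obtain ⟨p, hp⟩ := Option.isSome_iff_exists.mp (fp k hk)
  rw [pvLoopA_eq (PySem.Dict.ofList m) _ k [k], PySem.Dict.getD_eq_get?_getD, hp]
  simp only [Option.getD_some]
  rw [fg k p hp]
  simp only [List.singleton_append]
  rw [← pvTrace_head]
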